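-- pv_equiv track=rewrite | github.com/bmeares/Meerschaum | meerschaum/utils/misc.py | truncate_string_sections
-- ===== SOURCE A (Python) =====
-- def truncate_string_sections(item: str, delimeter: str = '_', max_len: int = 128) -> str:
--     """
--     Remove characters from each section of a string until the length is within the limit.
--
--     Parameters
--     ----------
--     item: str
--         The item name to be truncated.
--
--     delimeter: str, default '_'
--         Split `item` by this string into several sections.
--
--     max_len: int, default 128
--         The max acceptable length of the truncated version of `item`.
--
--     Returns
--     -------
--     The truncated string.
--
--     Examples
--     --------
--     >>> truncate_string_sections('abc_def_ghi', max_len=10)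
--     'ab_de_gh'
--
--     """
--     if len(item) < max_len:
--         return item
--
--     def _shorten(s: str) -> str:
--         return s[:-1] if len(s) > 1 else s
--
--     sections = list(enumerate(item.split('_')))
--     sorted_sections = sorted(sections, key=lambda x: (-1 * len(x[1])))
--     available_chars = max_len - len(sections)
--
--     _sections = [(i, s) for i, s in sorted_sections]
--     _sections_len = sum([len(s) for i, s in _sections])
--     _old_sections_len = _sections_len
--     while _sections_len > available_chars:
--         _sections = [(i, _shorten(s)) for i, s in _sections]
--         _old_sections_len = _sections_len
--         _sections_len = sum([len(s) for i, s in _sections])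
--         if _old_sections_len == _sections_len:
--             raise Exception(f"String could not be truncated: '{item}'")
--
--     new_sections = sorted(_sections, key=lambda x: x[0])
--     return delimeter.join([s for i, s in new_sections])
-- ===== SOURCE B (Python) =====
-- def truncate_string_sections(item: str, delimeter: str = '_', max_len: int = 128) -> str:
--     """
--     Remove characters from each section of a string until the length is within the limit.
--     Instead of shortening every section one character per round, binary-search the
--     per-section truncation amount k directly.
--     (Matches upstream: sections are always split on an underscore, joined with `delimeter`.)
--     """
--     if len(item) < max_len:
--         return item
--     secs = item.split('_')
--     avail = max_len - len(secs)
--     lens = [len(s) for s in secs]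
--
--     def total(k):
--         return sum(l - k if l - k >= 1 else (0 if l == 0 else 1) for l in lens)
--
--     hi = max(lens, default=0)
--     if total(hi) > avail:
--         raise Exception(f"String could not be truncated: '{item}'")
--     lo = 0
--     while lo < hi:
--         mid = (lo + hi) // 2
--         if total(mid) <= avail:
--             hi = mid
--         else:
--             lo = mid + 1
--     k = lo
--     return delimeter.join(s[:max(len(s) - k, 0 if len(s) == 0 else 1)] for s in secs)
-- ===== Notes on version B (the rewrite author's own statement) =====
-- stated objective: faster
-- what changed: A whittles one character off every section per round (two sorts plus a rescan each round) until the total fits; B binary-searches the uniform per-section truncation amount k directly and truncates each section once, with no sorting.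
import Mathlib
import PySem

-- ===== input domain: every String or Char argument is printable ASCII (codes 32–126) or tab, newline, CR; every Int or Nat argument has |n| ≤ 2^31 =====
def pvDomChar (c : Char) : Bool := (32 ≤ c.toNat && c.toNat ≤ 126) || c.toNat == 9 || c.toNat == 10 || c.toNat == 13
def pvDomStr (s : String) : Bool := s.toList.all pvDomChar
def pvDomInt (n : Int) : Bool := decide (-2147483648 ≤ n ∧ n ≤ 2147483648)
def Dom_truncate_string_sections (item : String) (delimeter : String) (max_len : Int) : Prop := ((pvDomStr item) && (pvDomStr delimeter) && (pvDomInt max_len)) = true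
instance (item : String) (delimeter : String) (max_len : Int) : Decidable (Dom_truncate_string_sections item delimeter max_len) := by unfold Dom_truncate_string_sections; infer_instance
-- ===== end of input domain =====

-- B replaces A's one-character-per-round whittling loop by a binary search on the uniform
-- per-section truncation amount k — objective: faster.

-- ===== PORT A =====
-- _shorten: s[:-1] if len(s) > 1 else s     (strings handled on code points, List Char)
def pvShorten (s : List Char) : List Char :=
  if 1 < s.length then PySem.List.slice s none (some (-1)) else s

-- sum([len(s) for i, s in _sections])
def pvSecLen (sections : List (Int × List Char)) : Nat :=
  (sections.map (fun p => p.2.length)).sum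

-- the while-loop of A; `none` is Python's `raise Exception(...)`.
-- Structural recursion on `fuel`; pvALoop supplies `pvSecLen sections + 1` fuel, which is enough
-- because the tracked total length strictly decreases every round (the stall branch raises).
def pvALoopF (fuel : Nat) (available : Int) (sections : List (Int × List Char)) :
    Option (List (Int × List Char)) :=
  match fuel with
  | 0 => none   -- never reached: fuel exceeds the number of rounds
  | fuel + 1 =>
    if (pvSecLen sections : Int) ≤ available then some sections
    else if pvSecLen (sections.map (fun p => (p.1, pvShorten p.2))) = pvSecLen sections then none
    else pvALoopF fuel available (sections.map (fun p => (p.1, pvShorten p.2)))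

def pvALoop (available : Int) (sections : List (Int × List Char)) : Option (List (Int × List Char)) :=
  pvALoopF (pvSecLen sections + 1) available sections

def truncate_string_sections (item : String) (delimeter : String) (max_len : Int) : String :=
  if (PySem.Str.len item : Int) < max_len then item
  else
    let sections := PySem.List.enumerate (PySem.Chars.splitOn item.toList ['_'])
    let sorted_sections := PySem.List.sorted sections (fun x => -(x.2.length : Int))
    let available_chars := max_len - (sections.length : Int)
    match pvALoop available_chars sorted_sections with
    | none => ""   -- Python raises Exception here; excluded by Pre_
    | some fin =>
        let new_sections := PySem.List.sorted fin (fun x => x.1)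
        String.ofList (PySem.Chars.join delimeter.toList (new_sections.map (fun p => p.2)))

-- ===== PORT B =====
-- total(k) = sum(l - k if l - k >= 1 else (0 if l == 0 else 1) for l in lens)
def pvTLen (k l : Nat) : Nat := if k < l then l - k else if l = 0 then 0 else 1

def pvTotal (lens : List Nat) (k : Nat) : Nat := (lens.map (fun l => pvTLen k l)).sum

-- the while-loop of B: binary search for the least k with total(k) <= avail.
-- Structural recursion on `fuel`; pvBSearch supplies `hi - lo + 1` fuel, which is enough
-- because the gap hi - lo strictly shrinks every iteration.
def pvBSearchF (fuel : Nat) (lens : List Nat) (avail : Int) (lo hi : Nat) : Nat :=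
  match fuel with
  | 0 => lo   -- never reached: fuel exceeds the number of iterations
  | fuel + 1 =>
    if lo < hi then
      if (pvTotal lens ((lo + hi) / 2) : Int) ≤ avail then pvBSearchF fuel lens avail lo ((lo + hi) / 2)
      else pvBSearchF fuel lens avail ((lo + hi) / 2 + 1) hi
    else lo

def pvBSearch (lens : List Nat) (avail : Int) (lo hi : Nat) : Nat :=
  pvBSearchF (hi - lo + 1) lens avail lo hi

def truncate_string_sections_alt (item : String) (delimeter : String) (max_len : Int) : String :=
  if (PySem.Str.len item : Int) < max_len then item
  else
    let secs := PySem.Chars.splitOn item.toList ['_']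
    let avail := max_len - (secs.length : Int)
    let lens := secs.map List.length
    let hi := PySem.List.maxD lens (fun l => l) 0
    if (pvTotal lens hi : Int) > avail then ""   -- Source B raises Exception here; excluded by Pre_
    else
      let k := pvBSearch lens avail 0 hi
      String.ofList (PySem.Chars.join delimeter.toList
        (secs.map (fun s =>
          PySem.Chars.slice s none (some (max ((s.length : Int) - k) (if s.length = 0 then 0 else 1))))))

-- ===== PRECONDITION & SPEC =====
-- Pre_ excludes exactly the inputs where A raises `Exception("String could not be truncated: …")`
-- (len(item) ≥ max_len while even one character per non-empty underscore-delimited section exceeds max_len - #sections);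
-- B raises the same exception there.
def Pre_truncate_string_sections (item : String) (delimeter : String) (max_len : Int) : Prop :=
  (PySem.Str.len item : Int) < max_len ∨
    (((PySem.Chars.splitOn item.toList ['_']).countP (fun s => !s.isEmpty) : Int)
      ≤ max_len - ((PySem.Chars.splitOn item.toList ['_']).length : Int))
instance (item : String) (delimeter : String) (max_len : Int) : Decidable (Pre_truncate_string_sections item delimeter max_len) := by unfold Pre_truncate_string_sections; infer_instance

def pvWitness_truncate_string_sections : String × String × Int := ("abc_def_ghi", "_", 10)

def Spec_truncate_string_sections (item : String) (delimeter : String) (max_len : Int) (out : String) : Prop := out = truncate_string_sections_alt item delimeter max_len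
instance (item : String) (delimeter : String) (max_len : Int) (out : String) : Decidable (Spec_truncate_string_sections item delimeter max_len out) := by unfold Spec_truncate_string_sections; infer_instance

-- ===== CLAIM (what is proved, stated in full; the proofs are below) =====
def Claim_equal_truncate_string_sections : Prop := ∀ (item : String) (delimeter : String) (max_len : Int), Dom_truncate_string_sections item delimeter max_len → Pre_truncate_string_sections item delimeter max_len → Spec_truncate_string_sections item delimeter max_len (truncate_string_sections item delimeter max_len)

-- ===== LEMMAS AND PROOFS =====

-- what a section has become after k whittling rounds of A (= B's slice bound)
def pvTrunc (k : Nat) (s : List Char) : List Char := s.take (pvTLen k s.length)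

theorem pvTLen_le (k l : Nat) : pvTLen k l ≤ l := by
  unfold pvTLen
  split
  · omega
  · split <;> omega

theorem pvTLen_antitone (l : Nat) {j k : Nat} (h : j ≤ k) : pvTLen k l ≤ pvTLen j l := by
  unfold pvTLen
  split_ifs <;> omega

theorem pvTrunc_zero (s : List Char) : pvTrunc 0 s = s := by
  have h : pvTLen 0 s.length = s.length := by unfold pvTLen; split_ifs <;> omega
  rw [pvTrunc, h, List.take_length]

theorem pvShorten_pvTrunc (k : Nat) (s : List Char) :
    pvShorten (pvTrunc k s) = pvTrunc (k + 1) s := by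
  have hLe := pvTLen_le k s.length
  unfold pvShorten pvTrunc
  rw [List.length_take]
  by_cases h1 : 1 < min (pvTLen k s.length) s.length
  · rw [if_pos h1, PySem.List.slice_to_neg_one, List.dropLast_eq_take, List.length_take,
      List.take_take]
    congr 1
    unfold pvTLen at *
    split_ifs at * <;> omega
  · rw [if_neg h1]
    congr 1
    unfold pvTLen at *
    split_ifs at * <;> omega

theorem pvSecLen_map_trunc (k : Nat) (ps : List (Int × List Char)) :
    pvSecLen (ps.map (fun p => (p.1, pvTrunc k p.2))) = pvTotal (ps.map (fun p => p.2.length)) k := by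
  unfold pvSecLen pvTotal
  rw [List.map_map, List.map_map]
  refine congrArg List.sum (List.map_congr_left ?_)
  intro p _
  show (pvTrunc k p.2).length = pvTLen k p.2.length
  rw [pvTrunc, List.length_take]
  exact Nat.min_eq_left (pvTLen_le k p.2.length)

theorem pvTotal_antitone (lens : List Nat) {j k : Nat} (h : j ≤ k) :
    pvTotal lens k ≤ pvTotal lens j :=
  List.sum_le_sum (fun l _ => pvTLen_antitone l h)

theorem sum_map_eq_pointwise {l : List Nat} {f g : Nat → Nat} (hle : ∀ x, f x ≤ g x)
    (hsum : (l.map f).sum = (l.map g).sum) : ∀ x ∈ l, f x = g x := by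
  induction l with
  | nil => intro x hx; cases hx
  | cons a t ih =>
    simp only [List.map_cons, List.sum_cons] at hsum
    have h1 : (t.map f).sum ≤ (t.map g).sum := List.sum_le_sum (fun i _ => hle i)
    have h2 : f a = g a := by have := hle a; omega
    intro x hx
    rcases List.mem_cons.mp hx with rfl | hx
    · exact h2
    · exact ih (by omega) x hx

theorem pvTotal_stall (lens : List Nat) (k : Nat)
    (h : pvTotal lens (k + 1) = pvTotal lens k) :
    ∀ j, k ≤ j → pvTotal lens j = pvTotal lens k := by
  have hpt : ∀ l ∈ lens, pvTLen (k + 1) l = pvTLen k l :=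
    sum_map_eq_pointwise (fun l => pvTLen_antitone l (Nat.le_succ k)) h
  intro j hj
  refine congrArg List.sum (List.map_congr_left ?_)
  intro l hl
  have h1 := hpt l hl
  unfold pvTLen at h1 ⊢
  split_ifs at h1 ⊢ <;> omega

theorem pvALoopF_eq (avail : Int) (ps : List (Int × List Char))
    (hex : ∃ j, (pvTotal (ps.map (fun p => p.2.length)) j : Int) ≤ avail) :
    ∀ fuel k, k ≤ Nat.find hex → pvTotal (ps.map (fun p => p.2.length)) k < fuel →
      pvALoopF fuel avail (ps.map (fun p => (p.1, pvTrunc k p.2)))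
        = some (ps.map (fun p => (p.1, pvTrunc (Nat.find hex) p.2))) := by
  have hfind := Nat.find_spec hex
  intro fuel
  induction fuel with
  | zero => intro k _ hf; exact absurd hf (Nat.not_lt_zero _)
  | succ fuel ih =>
    intro k hk hf
    by_cases hle : (pvTotal (ps.map (fun p => p.2.length)) k : Int) ≤ avail
    · have hkK : k = Nat.find hex := le_antisymm hk (Nat.find_min' hex hle)
      subst hkK
      rw [pvALoopF]
      simp only [pvSecLen_map_trunc]
      rw [if_pos hfind]
    · have hklt : k < Nat.find hex := lt_of_le_of_ne hk (fun h => hle (h ▸ hfind))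
      have hnot : ¬ ((pvTotal (ps.map (fun p => p.2.length)) k : Int) ≤ avail) := hle
      have hnext : (ps.map (fun p => (p.1, pvTrunc k p.2))).map (fun p => (p.1, pvShorten p.2))
          = ps.map (fun p => (p.1, pvTrunc (k + 1) p.2)) := by
        rw [List.map_map]
        exact List.map_congr_left (fun p _ => by
          show (p.1, pvShorten (pvTrunc k p.2)) = (p.1, pvTrunc (k + 1) p.2)
          rw [pvShorten_pvTrunc])
      have hstall : pvTotal (ps.map (fun p => p.2.length)) (k + 1)
          ≠ pvTotal (ps.map (fun p => p.2.length)) k := by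
        intro hst
        have := pvTotal_stall _ k hst (Nat.find hex) (le_of_lt hklt)
        rw [this] at hfind
        exact hnot hfind
      have hdec : pvTotal (ps.map (fun p => p.2.length)) (k + 1)
          ≤ pvTotal (ps.map (fun p => p.2.length)) k :=
        pvTotal_antitone _ (Nat.le_succ k)
      rw [pvALoopF]
      simp only [pvSecLen_map_trunc]
      rw [if_neg hnot, hnext]
      simp only [pvSecLen_map_trunc]
      rw [if_neg hstall]
      exact ih (k + 1) (by omega) (by omega)

theorem pvALoop_eq (avail : Int) (ps : List (Int × List Char))
    (hex : ∃ j, (pvTotal (ps.map (fun p => p.2.length)) j : Int) ≤ avail) :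
    ∀ k, k ≤ Nat.find hex →
      pvALoop avail (ps.map (fun p => (p.1, pvTrunc k p.2)))
        = some (ps.map (fun p => (p.1, pvTrunc (Nat.find hex) p.2))) := by
  intro k hk
  rw [pvALoop]
  refine pvALoopF_eq avail ps hex _ k hk ?_
  rw [pvSecLen_map_trunc, Nat.lt_succ_iff]

theorem pvBSearchF_eq (lens : List Nat) (avail : Int)
    (hex : ∃ j, (pvTotal lens j : Int) ≤ avail) :
    ∀ fuel lo hi, hi - lo < fuel → (pvTotal lens hi : Int) ≤ avail →
      (∀ j < lo, ¬ ((pvTotal lens j : Int) ≤ avail)) →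
      lo ≤ hi → pvBSearchF fuel lens avail lo hi = Nat.find hex := by
  intro fuel
  induction fuel with
  | zero => intro lo hi hf; exact absurd hf (Nat.not_lt_zero _)
  | succ fuel ih =>
    intro lo hi hf hhi hlo hlohi
    by_cases hlt : lo < hi
    · rw [pvBSearchF, if_pos hlt]
      by_cases hm : (pvTotal lens ((lo + hi) / 2) : Int) ≤ avail
      · rw [if_pos hm]
        exact ih lo ((lo + hi) / 2) (by omega) hm hlo (by omega)
      · rw [if_neg hm]
        refine ih ((lo + hi) / 2 + 1) hi (by omega) hhi ?_ (by omega)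
        intro j hj hPj
        exact hm (le_trans (by exact_mod_cast pvTotal_antitone lens (by omega)) hPj)
    · have heq : lo = hi := by omega
      subst heq
      rw [pvBSearchF, if_neg (by omega)]
      exact ((Nat.find_eq_iff hex).mpr ⟨hhi, hlo⟩).symm

theorem maxD_bound (lens : List Nat) : ∀ l ∈ lens, l ≤ PySem.List.maxD lens (fun l => l) 0 := by
  intro l hl
  cases hm : PySem.List.max? lens (fun l => l) with
  | none =>
    rw [PySem.List.max?_eq_none_iff] at hm
    subst hm
    cases hl
  | some m =>
    have h := PySem.List.max?_isMax hm l hl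
    simp only [PySem.List.maxD, hm, Option.getD_some]
    exact h

theorem pvTotal_top (lens : List Nat) {k : Nat} (hk : ∀ l ∈ lens, l ≤ k) :
    pvTotal lens k = lens.countP (fun l => decide (l ≠ 0)) := by
  induction lens with
  | nil => rfl
  | cons a t ih =>
    have ha := hk a (List.mem_cons_self ..)
    rw [pvTotal, List.map_cons, List.sum_cons, List.countP_cons]
    rw [show (t.map (fun l => pvTLen k l)).sum = pvTotal t k from rfl,
      ih (fun l hl => hk l (List.mem_cons_of_mem _ hl))]
    unfold pvTLen
    split_ifs <;> simp_all <;> omega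

-- B's slice computes exactly pvTrunc
theorem slice_eq_trunc (k : Nat) (s : List Char) :
    PySem.Chars.slice s none (some (max ((s.length : Int) - k) (if s.length = 0 then (0:Int) else 1)))
      = pvTrunc k s := by
  have hpos : (0:Int) ≤ max ((s.length : Int) - k) (if s.length = 0 then (0:Int) else 1) := by
    refine le_trans ?_ (le_max_right _ _)
    split_ifs <;> omega
  rw [PySem.Chars.slice_eq_listSlice, PySem.List.slice_to s hpos, pvTrunc]
  congr 1
  unfold pvTLen
  split_ifs <;> omega

-- ===== VERDICT (by name: the statement is the Claim_ definition above) =====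
theorem truncate_string_sections_spec : Claim_equal_truncate_string_sections := by
  unfold Claim_equal_truncate_string_sections
  intro item delimeter max_len _ hpre
  unfold Spec_truncate_string_sections
  by_cases hlen : (PySem.Str.len item : Int) < max_len
  · rw [truncate_string_sections, truncate_string_sections_alt, if_pos hlen, if_pos hlen]
  · have hpre2 := hpre.resolve_left hlen
    simp only [truncate_string_sections, truncate_string_sections_alt, if_neg hlen]
    set secs := PySem.Chars.splitOn item.toList ['_'] with hsecs
    set lens := secs.map List.length with hlens
    set avail := max_len - (secs.length : Int) with havail
    set hi0 := PySem.List.maxD lens (fun l => l) 0 with hhi0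
    -- total at hi0 is the number of non-empty sections
    have hcnt : lens.countP (fun l => decide (l ≠ 0)) = secs.countP (fun s => !s.isEmpty) := by
      rw [hlens, List.countP_map]
      refine List.countP_congr ?_
      intro s _
      simp [Function.comp]
    have htop : (pvTotal lens hi0 : Int) ≤ avail := by
      rw [pvTotal_top lens (maxD_bound lens), hcnt]
      exact hpre2
    have hex : ∃ j, (pvTotal lens j : Int) ≤ avail := ⟨hi0, htop⟩
    -- B side
    rw [if_neg (not_lt.mpr htop)]
    have hK : pvBSearch lens avail 0 hi0 = Nat.find hex := by
      rw [pvBSearch]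
      exact pvBSearchF_eq lens avail hex _ 0 hi0 (by omega) htop
        (fun j hj => absurd hj (Nat.not_lt_zero j)) (Nat.zero_le _)
    rw [hK]
    -- A side: the sorted list is a permutation of the enumeration, with the same totals
    set sections := PySem.List.enumerate secs with hsections
    set ss := PySem.List.sorted sections (fun x => -(x.2.length : Int)) with hss
    have hperm : ss.Perm sections := PySem.List.sorted_perm sections _ _
    have hsecl : sections.map (fun p => p.2.length) = lens := by
      rw [hlens, ← PySem.List.map_snd_enumerate secs 0, List.map_map, hsections]
      rfl
    have hlensperm : (ss.map (fun p => p.2.length)).Perm lens := by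
      rw [← hsecl]
      exact hperm.map _
    have htotEq : ∀ j, pvTotal (ss.map (fun p => p.2.length)) j = pvTotal lens j := by
      intro j
      exact (hlensperm.map _).sum_eq
    have hexS : ∃ j, (pvTotal (ss.map (fun p => p.2.length)) j : Int) ≤ avail := by
      refine ⟨Nat.find hex, ?_⟩
      rw [htotEq]
      exact Nat.find_spec hex
    have hfindEq : Nat.find hexS = Nat.find hex := by
      refine (Nat.find_eq_iff hexS).mpr ⟨?_, ?_⟩
      · rw [htotEq]; exact Nat.find_spec hex
      · intro m hm
        rw [htotEq]
        exact Nat.find_min hex hm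
    have hid : ss.map (fun p => (p.1, pvTrunc 0 p.2)) = ss := by
      have h : ∀ p ∈ ss, (p.1, pvTrunc 0 p.2) = p := fun p _ => by rw [pvTrunc_zero]
      rw [List.map_congr_left h, List.map_id']
    have havailA : max_len - (sections.length : Int) = avail := by
      rw [hsections, PySem.List.length_enumerate, havail]
    have hloop0 := pvALoop_eq avail ss hexS 0 (Nat.zero_le _)
    rw [hid, hfindEq] at hloop0
    have hloop : pvALoop (max_len - (sections.length : Int)) ss
        = some (ss.map (fun p => (p.1, pvTrunc (Nat.find hex) p.2))) := by
      rw [havailA]; exact hloop0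
    rw [hloop]
    show String.ofList (PySem.Chars.join delimeter.toList
      ((PySem.List.sorted (ss.map (fun p => (p.1, pvTrunc (Nat.find hex) p.2))) (fun x => x.1)).map
        (fun p => p.2))) = _
    -- the re-sort by index restores the enumeration order
    have hys_perm : (sections.map (fun p => (p.1, pvTrunc (Nat.find hex) p.2))).Perm
        (ss.map (fun p => (p.1, pvTrunc (Nat.find hex) p.2))) := (hperm.map _).symm
    have hpw : (sections.map (fun p => (p.1, pvTrunc (Nat.find hex) p.2))).Pairwise
        (fun a b => a.1 < b.1) := by
      have h1 : List.Pairwise (· < ·)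
          ((sections.map (fun p => (p.1, pvTrunc (Nat.find hex) p.2))).map (fun x => x.1)) := by
        rw [List.map_map]
        have : (fun x => x.1) ∘ (fun p : Int × List Char => (p.1, pvTrunc (Nat.find hex) p.2))
            = fun x => x.1 := rfl
        rw [this, hsections, PySem.List.map_fst_enumerate]
        exact PySem.List.pairwise_lt_pyRange_one 0 _
      exact List.pairwise_map.mp h1
    rw [PySem.List.sorted_eq_of_perm_of_pairwise_lt _ _ _ hys_perm hpw]
    -- both sides now join the uniformly truncated sections
    have hsnd : (sections.map (fun p => (p.1, pvTrunc (Nat.find hex) p.2))).map (fun p => p.2)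
        = secs.map (pvTrunc (Nat.find hex)) := by
      rw [List.map_map, hsections]
      have : ((fun p : Int × List Char => p.2) ∘ (fun p : Int × List Char => (p.1, pvTrunc (Nat.find hex) p.2)))
          = (pvTrunc (Nat.find hex)) ∘ (fun p : Int × List Char => p.2) := rfl
      rw [this, ← List.map_map, PySem.List.map_snd_enumerate]
    rw [hsnd, List.map_congr_left (fun s _ => slice_eq_trunc (Nat.find hex) s)]
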